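-- pv_equiv track=rewrite | github.com/dhodgson615/TeX-Formatter | src/texformatter.py | collapse_and_trim_lines
-- ===== SOURCE A (Python) =====
-- def collapse_and_trim_lines(lines: list[str]) -> list[str]:
--     """Trim trailing spaces from each line and collapse multiple
--     consecutive blank lines into one."""
--     result: list[str] = []
--     blank_count = 0
--
--     for line in lines:
--         line = line.rstrip()
--
--         if line == "":
--             blank_count += 1
--
--             if blank_count <= 1:
--                 result.append("")
--
--         else:
--             blank_count = 0
--             result.append(line)
--
--     return result
-- ===== SOURCE B (Python) =====
-- def collapse_and_trim_lines(lines: list[str]) -> list[str]: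
--     """Trim trailing spaces from each line and collapse multiple
--     consecutive blank lines into one."""
--     stripped = [l.rstrip() for l in lines]
--     result: list[str] = []
--     i, n = 0, len(stripped)
--     while i < n:
--         if stripped[i] == "":
--             result.append("")
--             while i < n and stripped[i] == "":
--                 i += 1
--         else:
--             result.append(stripped[i])
--             i += 1
--     return result
-- ===== Notes on version B (the rewrite author's own statement) =====
-- stated objective: alternative
-- what changed: replaces the running blank-counter state machine with a two-phase run-partitioning pass: strip all lines first, then walk the stripped list skipping each whole blank run after emitting a single empty line
import Mathlib
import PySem

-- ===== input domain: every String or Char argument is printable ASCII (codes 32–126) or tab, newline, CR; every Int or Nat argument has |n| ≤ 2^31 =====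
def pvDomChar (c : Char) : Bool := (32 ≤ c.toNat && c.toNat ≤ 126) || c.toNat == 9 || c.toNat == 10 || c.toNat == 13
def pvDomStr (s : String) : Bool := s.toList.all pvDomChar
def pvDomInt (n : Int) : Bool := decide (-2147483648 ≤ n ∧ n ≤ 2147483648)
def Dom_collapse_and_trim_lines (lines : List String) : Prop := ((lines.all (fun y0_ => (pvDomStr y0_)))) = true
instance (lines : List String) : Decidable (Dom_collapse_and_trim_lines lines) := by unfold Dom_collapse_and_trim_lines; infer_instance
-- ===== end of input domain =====

-- B replaces A's running blank-counter with a strip-first, run-skipping pass; same cost, different structure.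
-- ===== PORT A =====
def pvStepA (st : List String × Int) (line : String) : List String × Int :=
  let line := PySem.Str.rstrip line
  if line = "" then
    let bc := st.2 + 1
    if bc ≤ 1 then (st.1 ++ [""], bc) else (st.1, bc)
  else
    (st.1 ++ [line], (0 : Int))

def collapse_and_trim_lines (lines : List String) : List String :=
  (lines.foldl pvStepA ([], 0)).1

-- ===== PORT B =====
-- run-skipping walk over the pre-stripped list (Source B's index loop: one "" per blank run)
def pvRunCollapse : List String → List String
  | [] => []
  | x :: xs =>
    if x = "" then "" :: pvRunCollapse (xs.dropWhile (· = ""))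
    else x :: pvRunCollapse xs
termination_by l => l.length
decreasing_by
  · exact Nat.lt_succ_of_le (List.length_dropWhile_le _ _)
  · exact Nat.lt_succ_self _

def collapse_and_trim_lines_alt (lines : List String) : List String :=
  pvRunCollapse (lines.map PySem.Str.rstrip)

-- ===== PRECONDITION & SPEC =====
def Spec_collapse_and_trim_lines (lines : List String) (out : List String) : Prop := out = collapse_and_trim_lines_alt lines
instance (lines : List String) (out : List String) : Decidable (Spec_collapse_and_trim_lines lines out) := by unfold Spec_collapse_and_trim_lines; infer_instance

-- ===== CLAIM (what is proved, stated in full; the proofs are below) =====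
def Claim_equal_collapse_and_trim_lines : Prop := ∀ (lines : List String), Dom_collapse_and_trim_lines lines → Spec_collapse_and_trim_lines lines (collapse_and_trim_lines lines)

-- ===== LEMMAS AND PROOFS =====

-- loop invariant: from accumulator (res, bc) with 0 ≤ bc, A's fold produces res followed by
-- the run-collapse of the stripped remainder (with the current blank run skipped when bc ≥ 1)
theorem pv_key (ls : List String) : ∀ (res : List String) (bc : Int), 0 ≤ bc →
    (ls.foldl pvStepA (res, bc)).1 =
    res ++ (if bc ≤ 0 then pvRunCollapse (ls.map PySem.Str.rstrip)
            else pvRunCollapse ((ls.map PySem.Str.rstrip).dropWhile (· = ""))) := by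
  induction ls with
  | nil => intro res bc h; simp [pvRunCollapse]
  | cons x xs ih =>
    intro res bc h
    rw [List.foldl_cons, List.map_cons]
    by_cases hx : PySem.Str.rstrip x = ""
    · by_cases hbc : bc ≤ 0
      · have hbc0 : bc = 0 := le_antisymm hbc h
        subst hbc0
        rw [show pvStepA (res, 0) x = (res ++ [""], 1) by
              simp [pvStepA, hx]]
        rw [ih (res ++ [""]) 1 (by omega)]
        simp [pvRunCollapse, hx]
      · rw [show pvStepA (res, bc) x = (res, bc + 1) by
              simp only [pvStepA, hx, if_neg (by omega : ¬ bc + 1 ≤ 1)]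
              simp]
        rw [ih res (bc + 1) (by omega)]
        rw [if_neg (by omega : ¬ bc + 1 ≤ 0), if_neg hbc]
        simp [List.dropWhile, hx]
    · rw [show pvStepA (res, bc) x = (res ++ [PySem.Str.rstrip x], 0) by
            simp [pvStepA, hx]]
      rw [ih (res ++ [PySem.Str.rstrip x]) 0 le_rfl]
      simp only [if_pos (le_refl (0:Int))]
      have hd : (PySem.Str.rstrip x :: xs.map PySem.Str.rstrip).dropWhile (· = "") =
          PySem.Str.rstrip x :: xs.map PySem.Str.rstrip := by
        simp [List.dropWhile, hx]
      split_ifs with hbc <;>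
        simp [pvRunCollapse, hx, hd, List.append_assoc]

-- ===== VERDICT (by name: the statement is the Claim_ definition above) =====
theorem collapse_and_trim_lines_spec : Claim_equal_collapse_and_trim_lines := by
  intro lines _
  unfold Spec_collapse_and_trim_lines collapse_and_trim_lines collapse_and_trim_lines_alt
  rw [pv_key lines [] 0 le_rfl]
  simp
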